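-- pv_equiv track=rewrite | github.com/TelurXS/Python | LR9/main.py | is_compartment_with_women_only
-- ===== SOURCE A (Python) =====
-- def is_compartment_with_women_only(compartment: dict[int, str | None]) -> bool:
--     is_found: bool = False
--
--     for number, seat in compartment.items():
--         if seat == "m":
--             return False
--
--         if seat == "w" and not is_found:
--             is_found = True
--
--     return is_found
-- ===== SOURCE B (Python) =====
-- def is_compartment_with_women_only(compartment: dict[int, str | None]) -> bool:
--     counts: dict[str | None, int] = {}
--     for seat in compartment.values():
--         counts[seat] = counts.get(seat, 0) + 1
--     return counts.get("m", 0) == 0 and counts.get("w", 0) > 0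
-- ===== Notes on version B (the rewrite author's own statement) =====
-- stated objective: alternative
-- what changed: Replaces the flag-carrying early-exit scan with a staged aggregation: first build a full histogram (dict of counts) of the seat values, then decide from the counts of 'm' and 'w'.
import Mathlib
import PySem

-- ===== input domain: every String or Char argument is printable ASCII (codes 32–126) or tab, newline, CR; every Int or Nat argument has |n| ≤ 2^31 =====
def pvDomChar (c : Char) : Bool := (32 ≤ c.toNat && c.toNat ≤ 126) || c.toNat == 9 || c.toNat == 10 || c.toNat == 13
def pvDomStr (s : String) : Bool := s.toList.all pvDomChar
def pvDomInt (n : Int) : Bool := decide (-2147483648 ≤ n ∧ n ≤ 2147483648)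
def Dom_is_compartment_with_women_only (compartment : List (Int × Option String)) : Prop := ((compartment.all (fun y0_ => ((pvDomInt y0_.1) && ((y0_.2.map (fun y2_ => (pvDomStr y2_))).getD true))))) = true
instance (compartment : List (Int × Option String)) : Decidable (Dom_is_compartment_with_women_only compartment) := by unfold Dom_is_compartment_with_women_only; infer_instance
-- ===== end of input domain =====

-- ===== PORT A =====
-- B replaces A's flag-carrying early-exit scan with a staged aggregation: build a histogram of seat values, then decide from the counts (objective: alternative).
def pvLoopA : List (Int × Option String) → Bool → Bool
  | [], is_found => is_found
  | (_, seat) :: rest, is_found =>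
    if seat == some "m" then false
    else pvLoopA rest (if seat == some "w" && !is_found then true else is_found)

def is_compartment_with_women_only (compartment : List (Int × Option String)) : Bool :=
  pvLoopA compartment false

-- ===== PORT B =====
def is_compartment_with_women_only_alt (compartment : List (Int × Option String)) : Bool :=
  let counts : PySem.Dict (Option String) Int :=
    (compartment.map Prod.snd).foldl (fun d seat => d.insert seat (d.getD seat 0 + 1)) PySem.Dict.empty
  (counts.getD (some "m") 0 == 0) && (counts.getD (some "w") 0 > 0)

-- ===== PRECONDITION & SPEC =====
def Spec_is_compartment_with_women_only (compartment : List (Int × Option String)) (out : Bool) : Prop := out = is_compartment_with_women_only_alt compartment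
instance (compartment : List (Int × Option String)) (out : Bool) : Decidable (Spec_is_compartment_with_women_only compartment out) := by unfold Spec_is_compartment_with_women_only; infer_instance

-- ===== CLAIM (what is proved, stated in full; the proofs are below) =====
def Claim_equal_is_compartment_with_women_only : Prop := ∀ (compartment : List (Int × Option String)), Dom_is_compartment_with_women_only compartment → Spec_is_compartment_with_women_only compartment (is_compartment_with_women_only compartment)

-- ===== LEMMAS AND PROOFS =====
theorem pvLoopA_char (l : List (Int × Option String)) (f : Bool) :
    pvLoopA l f =
      (!(l.map Prod.snd).contains (some "m") && (f || (l.map Prod.snd).contains (some "w"))) := by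
  induction l generalizing f with
  | nil => simp [pvLoopA]
  | cons h t ih =>
    obtain ⟨n, seat⟩ := h
    simp only [pvLoopA, List.map_cons, List.contains_cons]
    by_cases hm : seat = some "m"
    · simp [hm]
    · by_cases hw : seat = some "w"
      all_goals
        have h1 : (seat == some "m") = false := by simp [hm]
        have h2 : (some "m" == seat) = false := by simp [Ne.symm hm]
        have h3 : ((some "w" : Option String) == seat) = decide (seat = some "w") := by
          cases seat <;> simp [BEq.comm, Bool.beq_eq_decide_eq]
        cases f <;> simp [h1, h2, h3, hw, ih]

theorem altB_char (compartment : List (Int × Option String)) :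
    is_compartment_with_women_only_alt compartment =
      (!(compartment.map Prod.snd).contains (some "m") && (compartment.map Prod.snd).contains (some "w")) := by
  unfold is_compartment_with_women_only_alt
  rw [PySem.Dict.foldl_insert_getD_add_one_eq_counter]
  simp only [PySem.Dict.getD_counter, Bool.beq_eq_decide_eq]
  by_cases h1 : some "m" ∈ compartment.map Prod.snd <;>
  by_cases h2 : some "w" ∈ compartment.map Prod.snd <;>
    simp [h1, h2, List.count_eq_zero, Int.natCast_pos, List.count_pos_iff]

-- ===== VERDICT (by name: the statement is the Claim_ definition above) =====
theorem is_compartment_with_women_only_spec : Claim_equal_is_compartment_with_women_only := by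
  intro c _
  unfold Spec_is_compartment_with_women_only
  rw [altB_char, is_compartment_with_women_only, pvLoopA_char]
  simp
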